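-- pv_equiv track=rewrite | github.com/eric-ganzert/hardware-tests | STS_linearity.py | order_data
-- ===== SOURCE A (Python) =====
-- VIS_STS_SERIAL_NUM = "STSV0_S09004"
--
-- NIR_STS_SERIAL_NUM = "STSN0_S08887"
--
-- def order_data(list):
--     NIR_STS = []
--     VIS_STS = []
--     for item in list:
--         if item['serialnum'] == VIS_STS_SERIAL_NUM:
--             VIS_STS.append(item)
--         if item['serialnum'] == NIR_STS_SERIAL_NUM:
--             NIR_STS.append(item)
--
--     NIR_STS = sorted(NIR_STS, key=lambda k: k['wavelengths'])
--     VIS_STS = sorted(VIS_STS, key=lambda k: k['wavelengths'])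
--     result = []
--     result.append(VIS_STS)
--     result.append(NIR_STS)
--     return result
-- ===== SOURCE B (Python) =====
-- VIS_STS_SERIAL_NUM = "STSV0_S09004"
--
-- NIR_STS_SERIAL_NUM = "STSN0_S08887"
--
-- def order_data(list):
--     # Single filter for the two known serials, ONE stable sort of the combined
--     # matched list, then partition the already-sorted list by serial number.
--     matched = [item for item in list
--                if item['serialnum'] in (VIS_STS_SERIAL_NUM, NIR_STS_SERIAL_NUM)]
--     ordered = sorted(matched, key=lambda k: k['wavelengths'])
--     return [[it for it in ordered if it['serialnum'] == VIS_STS_SERIAL_NUM],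
--             [it for it in ordered if it['serialnum'] == NIR_STS_SERIAL_NUM]]
-- ===== Notes on version B (the rewrite author's own statement) =====
-- stated objective: alternative
-- what changed: B reverses the pass order: instead of partitioning into two lists and sorting each, it filters the matched items once, sorts that combined list once by wavelengths, and partitions the sorted list by serial number, relying on sort stability for tie order.
import Mathlib
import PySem

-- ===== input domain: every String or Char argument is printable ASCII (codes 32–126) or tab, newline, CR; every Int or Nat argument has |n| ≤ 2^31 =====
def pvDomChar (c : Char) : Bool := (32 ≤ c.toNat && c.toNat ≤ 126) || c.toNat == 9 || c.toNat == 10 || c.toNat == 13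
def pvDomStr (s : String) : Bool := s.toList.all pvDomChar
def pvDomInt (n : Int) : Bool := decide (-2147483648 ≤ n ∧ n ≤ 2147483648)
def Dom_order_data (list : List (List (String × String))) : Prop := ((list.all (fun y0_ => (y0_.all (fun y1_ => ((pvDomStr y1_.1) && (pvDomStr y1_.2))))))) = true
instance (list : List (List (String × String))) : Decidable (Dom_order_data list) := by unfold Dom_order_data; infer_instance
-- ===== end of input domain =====

-- B reverses A's pass order: one filter of the matched items, one stable sort of the
-- combined list by wavelengths, then partition the sorted list by serial (objective: alternative).

-- shared helpers: the two dict lookups item['serialnum'] / item['wavelengths'] (total form via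
-- getD; Pre_ guarantees the keys are present wherever they are consulted)
def pvVIS : String := "STSV0_S09004"
def pvNIR : String := "STSN0_S08887"
def pvSerial (item : List (String × String)) : String :=
  PySem.Dict.getD (PySem.Dict.ofList item) "serialnum" ""
def pvWave (item : List (String × String)) : String :=
  PySem.Dict.getD (PySem.Dict.ofList item) "wavelengths" ""

-- ===== PORT A =====
-- A's loop body: two successive ifs appending the item to VIS_STS (st.1) / NIR_STS (st.2)
def pvStepA (st : List (List (String × String)) × List (List (String × String)))
    (item : List (String × String)) :
    List (List (String × String)) × List (List (String × String)) :=
  let st := if pvSerial item == pvVIS then (st.1 ++ [item], st.2) else st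
  let st := if pvSerial item == pvNIR then (st.1, st.2 ++ [item]) else st
  st

def order_data (list : List (List (String × String))) : List (List (List (String × String))) :=
  let st := list.foldl pvStepA ([], [])
  let NIR_STS := PySem.List.sorted st.2 (fun k => pvWave k)
  let VIS_STS := PySem.List.sorted st.1 (fun k => pvWave k)
  [] ++ [VIS_STS] ++ [NIR_STS]

-- ===== PORT B =====
def order_data_alt (list : List (List (String × String))) : List (List (List (String × String))) :=
  let matched := list.filter (fun item => pvSerial item == pvVIS || pvSerial item == pvNIR)
  let ordered := PySem.List.sorted matched (fun k => pvWave k)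
  [ordered.filter (fun it => pvSerial it == pvVIS),
   ordered.filter (fun it => pvSerial it == pvNIR)]

-- ===== PRECONDITION & SPEC =====
-- Pre_: exactly where Python A returns: every item has a 'serialnum' key, and every item whose
-- serial number is one of the two STS serials also has a 'wavelengths' key (else KeyError).
def Pre_order_data (list : List (List (String × String))) : Prop :=
  (list.all (fun item =>
    (PySem.Dict.ofList item).contains "serialnum" &&
    (!(pvSerial item == pvVIS || pvSerial item == pvNIR)
      || (PySem.Dict.ofList item).contains "wavelengths"))) = true
instance (list : List (List (String × String))) : Decidable (Pre_order_data list) := by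
  unfold Pre_order_data; infer_instance
def pvWitness_order_data : (List (List (String × String))) :=
  [[("serialnum", "STSV0_S09004"), ("wavelengths", "500")],
   [("serialnum", "STSN0_S08887"), ("wavelengths", "900")]]
def Spec_order_data (list : List (List (String × String))) (out : List (List (List (String × String)))) : Prop := out = order_data_alt list
instance (list : List (List (String × String))) (out : List (List (List (String × String)))) : Decidable (Spec_order_data list out) := by unfold Spec_order_data; infer_instance

-- ===== CLAIM (what is proved, stated in full; the proofs are below) =====
def Claim_equal_order_data : Prop := ∀ (list : List (List (String × String))), Dom_order_data list → Pre_order_data list → Spec_order_data list (order_data list)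

-- ===== LEMMAS AND PROOFS =====

-- A's single loop with two independent append-accumulators is a pair of filters.
theorem pvFoldl_pair (l : List (List (String × String)))
    (a b : List (List (String × String))) :
    l.foldl pvStepA (a, b)
    = (a ++ l.filter (fun it => pvSerial it == pvVIS),
       b ++ l.filter (fun it => pvSerial it == pvNIR)) := by
  induction l generalizing a b with
  | nil => simp
  | cons x xs ih =>
    rw [List.foldl_cons]
    have hstep : pvStepA (a, b) x
        = (a ++ if pvSerial x == pvVIS then [x] else [],
           b ++ if pvSerial x == pvNIR then [x] else []) := by
      unfold pvStepA
      cases hv : pvSerial x == pvVIS <;> cases hn : pvSerial x == pvNIR <;> simp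
    rw [hstep, ih, List.filter_cons, List.filter_cons]
    cases hv : pvSerial x == pvVIS <;> cases hn : pvSerial x == pvNIR <;> simp

-- if x sorts strictly before everything in zs, insertBy puts it in front
theorem pvInsertBy_front {α : Type} (before : α → α → Bool) (x : α) (zs : List α)
    (h : ∀ z ∈ zs, before x z = true) :
    PySem.List.insertBy before x zs = x :: zs := by
  cases zs with
  | nil => rfl
  | cons z zs => simp [PySem.List.insertBy, h z (by simp)]

-- filtering commutes with a single stable insertion into a key-sorted list
theorem pvInsertBy_filter (key : List (String × String) → String)
    (p : List (String × String) → Bool) (x : List (String × String))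
    (ys : List (List (String × String)))
    (hs : ys.Pairwise (fun a b => key a ≤ key b)) :
    (PySem.List.insertBy (fun a b => decide (key a < key b)) x ys).filter p
    = if p x then PySem.List.insertBy (fun a b => decide (key a < key b)) x (ys.filter p)
      else ys.filter p := by
  induction ys with
  | nil => cases hp : p x <;> simp [PySem.List.insertBy, hp]
  | cons y ys ih =>
    rcases List.pairwise_cons.mp hs with ⟨hy, hs'⟩
    by_cases hlt : key x < key y
    · -- x goes in front of y, and in front of every filtered element as well
      have hfront : ∀ z ∈ (y :: ys).filter p, decide (key x < key z) = true := by
        intro z hz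
        have hz' := List.mem_of_mem_filter hz
        rcases List.mem_cons.mp hz' with rfl | hz''
        · simpa using hlt
        · simpa using lt_of_lt_of_le hlt (hy z hz'')
      rw [pvInsertBy_front _ x ((y :: ys).filter p) hfront]
      have hins : PySem.List.insertBy (fun a b => decide (key a < key b)) x (y :: ys)
          = x :: y :: ys := by simp [PySem.List.insertBy, hlt]
      rw [hins, List.filter_cons]
    · -- x is inserted further down
      have hins : PySem.List.insertBy (fun a b => decide (key a < key b)) x (y :: ys)
          = y :: PySem.List.insertBy (fun a b => decide (key a < key b)) x ys := by
        simp [PySem.List.insertBy, hlt]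
      rw [hins, List.filter_cons, List.filter_cons, ih hs']
      have h2 : PySem.List.insertBy (fun a b => decide (key a < key b)) x (y :: ys.filter p)
          = y :: PySem.List.insertBy (fun a b => decide (key a < key b)) x (ys.filter p) := by
        simp only [PySem.List.insertBy]
        rw [if_neg (by simpa using hlt)]
      cases hpy : p y
      · rfl
      · cases hp : p x
        · rfl
        · split_ifs <;> first | rfl | exact h2.symm

-- stability: filtering commutes with the whole sort
theorem pvFilter_sorted (p : List (String × String) → Bool)
    (key : List (String × String) → String) (xs : List (List (String × String))) :
    (PySem.List.sorted xs key).filter p = PySem.List.sorted (xs.filter p) key := by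
  induction xs using List.reverseRecOn with
  | nil => rfl
  | append_singleton xs x ih =>
    rw [PySem.List.sorted_eq_foldl_insertBy (xs ++ [x]), List.foldl_append,
        ← PySem.List.sorted_eq_foldl_insertBy xs]
    simp only [List.foldl_cons, List.foldl_nil]
    rw [pvInsertBy_filter key p x _ (PySem.List.sorted_pairwise xs key), ih,
        List.filter_append]
    cases hp : p x
    · simp [hp]
    · have hfx : List.filter p [x] = [x] := by simp [hp]
      rw [hfx, if_pos rfl]
      rw [PySem.List.sorted_eq_foldl_insertBy (xs.filter p ++ [x]), List.foldl_append,
          ← PySem.List.sorted_eq_foldl_insertBy (xs.filter p)]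
      simp

-- ===== VERDICT (by name: the statement is the Claim_ definition above) =====
theorem order_data_spec : Claim_equal_order_data := by
  intro l _ _
  show order_data l = order_data_alt l
  unfold order_data order_data_alt
  simp only
  rw [pvFoldl_pair l [] []]
  simp only [List.nil_append]
  rw [pvFilter_sorted (fun it => pvSerial it == pvVIS),
      pvFilter_sorted (fun it => pvSerial it == pvNIR),
      List.filter_filter, List.filter_filter]
  have h1 : l.filter (fun a => (pvSerial a == pvVIS) && (pvSerial a == pvVIS || pvSerial a == pvNIR))
      = l.filter (fun it => pvSerial it == pvVIS) :=
    List.filter_congr (fun x _ => by cases h : pvSerial x == pvVIS <;> simp_all)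
  have h2 : l.filter (fun a => (pvSerial a == pvNIR) && (pvSerial a == pvVIS || pvSerial a == pvNIR))
      = l.filter (fun it => pvSerial it == pvNIR) :=
    List.filter_congr (fun x _ => by cases h : pvSerial x == pvNIR <;> simp_all)
  rw [h1, h2]
  rfl
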